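-- pv_equiv track=rewrite | github.com/sudiptap/algods | ds_algo/patterns/dynamic_programming/11_bitmask_dp/solutions/3533-concatenated-divisibility.py | concatenatedDivisibility
-- ===== SOURCE A (Python) =====
-- from typing import List
--
-- def concatenatedDivisibility(nums: List[int], k: int) -> List[int]:
--     n = len(nums)
--     # Precompute number of digits for each number
--     num_digits = [len(str(x)) for x in nums]
--     # Precompute 10^d mod k
--     pow10 = [1] * 11
--     for d in range(1, 11):
--         pow10[d] = pow10[d - 1] * 10 % k
--
--     full = (1 << n) - 1
--
--     # dp[mask][rem] = index of last added element (for reconstruction), or -1 if not reachable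
--     # Use BFS/DP forward
--     dp = [[False] * k for _ in range(1 << n)]
--     parent = [[(-1, -1)] * k for _ in range(1 << n)]  # (prev_mask, prev_rem)
--     last_elem = [[-1] * k for _ in range(1 << n)]
--
--     dp[0][0] = True
--
--     for mask in range(1 << n):
--         for rem in range(k):
--             if not dp[mask][rem]:
--                 continue
--             # Try adding each unused element (in order for lex smallest)
--             for i in range(n):
--                 if mask & (1 << i):
--                     continue
--                 new_mask = mask | (1 << i)
--                 new_rem = (rem * pow10[num_digits[i]] + nums[i]) % k
--                 if not dp[new_mask][new_rem]:
--                     dp[new_mask][new_rem] = True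
--                     parent[new_mask][new_rem] = (mask, rem)
--                     last_elem[new_mask][new_rem] = i
--
--     if not dp[full][0]:
--         return []
--
--     # Reconstruct: backtrack from (full, 0)
--     result = []
--     mask, rem = full, 0
--     while mask != 0:
--         i = last_elem[mask][rem]
--         result.append(nums[i])
--         prev_mask, prev_rem = parent[mask][rem]
--         mask, rem = prev_mask, prev_rem
--
--     result.reverse()
--     return result
-- ===== SOURCE B (Python) =====
-- from typing import List
--
-- def concatenatedDivisibility(nums: List[int], k: int) -> List[int]:
--     # Same forward bitmask DP, but each reachable (mask, rem) state stores the
--     # actual concatenation-order list built so far (recorded on first discovery),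
--     # so the parent/last_elem tables and the backtracking loop disappear.
--     n = len(nums)
--     num_digits = [len(str(x)) for x in nums]
--     pow10 = [1] * 11
--     for d in range(1, 11):
--         pow10[d] = pow10[d - 1] * 10 % k
--
--     full = (1 << n) - 1
--     dp = {(0, 0): []}
--     for mask in range(1 << n):
--         for rem in range(k):
--             path = dp.get((mask, rem))
--             if path is None:
--                 continue
--             for i in range(n):
--                 if mask & (1 << i):
--                     continue
--                 new_mask = mask | (1 << i)
--                 new_rem = (rem * pow10[num_digits[i]] + nums[i]) % k
--                 if (new_mask, new_rem) not in dp: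
--                     dp[new_mask, new_rem] = path + [nums[i]]
--     return dp.get((full, 0), [])
-- ===== Notes on version B (the rewrite author's own statement) =====
-- stated objective: simpler
-- what changed: The parent/last_elem pointer tables and the separate backtracking reconstruction loop are replaced by a single dict that stores, at each first-discovered (mask, rem) state, the actual concatenation-order list built so far, so the answer is read off directly at (full, 0).
import Mathlib
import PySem

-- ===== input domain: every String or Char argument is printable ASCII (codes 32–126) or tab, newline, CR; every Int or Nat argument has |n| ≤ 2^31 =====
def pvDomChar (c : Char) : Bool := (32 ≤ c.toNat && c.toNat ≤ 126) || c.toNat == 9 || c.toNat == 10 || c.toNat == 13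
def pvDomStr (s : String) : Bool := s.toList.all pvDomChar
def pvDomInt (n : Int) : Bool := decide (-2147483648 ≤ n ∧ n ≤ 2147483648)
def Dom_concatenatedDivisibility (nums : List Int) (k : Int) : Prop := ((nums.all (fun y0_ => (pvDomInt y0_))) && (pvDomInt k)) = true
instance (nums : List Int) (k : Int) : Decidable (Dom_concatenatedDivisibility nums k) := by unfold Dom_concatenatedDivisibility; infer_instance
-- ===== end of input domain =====

-- B replaces A's parent/last_elem pointer tables and backtracking reconstruction loop by a dict storing,
-- at each first-discovered (mask, rem) state, the concatenation-order list built so far (objective: simpler).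

-- ===== PORT A =====
-- shared precomputations (identical lines in both Pythons): len(str(x)), the pow10 table, the new_rem formula
def pvDigits (x : Int) : Nat := (PySem.Int.toChars x).length

def pvPow10 (k : Int) : List Int :=
  (List.range 10).foldl
    (fun l d => l.set (d + 1) (PySem.Int.mod (l.getD d 0 * 10) k))
    (List.replicate 11 1)

def pvNextRem (nums : List Int) (k : Int) (nd : List Nat) (p10 : List Int) (rem i : Nat) : Nat :=
  (PySem.Int.mod ((rem : Int) * p10.getD (nd.getD i 0) 0 + nums.getD i 0) k).toNat

-- 2D-list read tbl[m][r] and write tbl[m][r] = v (A keeps dp/parent/last_elem as lists of lists)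
def pvGet2 {α : Type} (tbl : List (List α)) (m r : Nat) (d : α) : α := (tbl.getD m []).getD r d

def pvSet2 {α : Type} (tbl : List (List α)) (m r : Nat) (v : α) : List (List α) :=
  tbl.set m ((tbl.getD m []).set r v)

-- A's inner `for i in range(n)` body: update dp / parent / last_elem on first discovery
def pvStepA (nums : List Int) (k : Int) (nd : List Nat) (p10 : List Int) (mask rem : Nat)
    (st : List (List Bool) × List (List (Int × Int)) × List (List Int)) (i : Nat) :
    List (List Bool) × List (List (Int × Int)) × List (List Int) :=
  if mask.testBit i then st
  else
    let nm := mask ||| (1 <<< i)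
    let nr := pvNextRem nums k nd p10 rem i
    if pvGet2 st.1 nm nr false then st
    else (pvSet2 st.1 nm nr true,
          pvSet2 st.2.1 nm nr ((mask : Int), (rem : Int)),
          pvSet2 st.2.2 nm nr (i : Int))

-- A's triple loop building (dp, parent, last_elem); dp[0][0] = True before the loop
def pvTablesA (nums : List Int) (k : Int) :
    List (List Bool) × List (List (Int × Int)) × List (List Int) :=
  (List.range (2 ^ nums.length)).foldl
    (fun st mask =>
      (List.range k.toNat).foldl
        (fun st rem =>
          if pvGet2 st.1 mask rem false then
            (List.range nums.length).foldl
              (pvStepA nums k (nums.map pvDigits) (pvPow10 k) mask rem) st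
          else st) st)
    (pvSet2 (List.replicate (2 ^ nums.length) (List.replicate k.toNat false)) 0 0 true,
     List.replicate (2 ^ nums.length) (List.replicate k.toNat ((-1 : Int), (-1 : Int))),
     List.replicate (2 ^ nums.length) (List.replicate k.toNat (-1 : Int)))

-- A's `while mask != 0` reconstruction loop (fuel-bounded; 2^n steps always suffice)
def pvBacktrack (nums : List Int) (parent : List (List (Int × Int))) (last : List (List Int)) :
    Nat → Nat → Nat → List Int → List Int
  | 0, _, _, acc => acc
  | fuel + 1, mask, rem, acc =>
    if mask = 0 then acc
    else pvBacktrack nums parent last fuel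
           (pvGet2 parent mask rem ((-1 : Int), (-1 : Int))).1.toNat
           (pvGet2 parent mask rem ((-1 : Int), (-1 : Int))).2.toNat
           (acc ++ [nums.getD (pvGet2 last mask rem (-1 : Int)).toNat 0])

def concatenatedDivisibility (nums : List Int) (k : Int) : List Int :=
  let n := nums.length
  let full := 2 ^ n - 1
  let st := pvTablesA nums k
  if pvGet2 st.1 full 0 false then
    (pvBacktrack nums st.2.1 st.2.2 (2 ^ n) full 0 []).reverse
  else []

-- ===== PORT B =====
-- B's inner `for i in range(n)` body: record path + [nums[i]] in the dict on first discovery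
def pvStepB (nums : List Int) (k : Int) (nd : List Nat) (p10 : List Int) (mask rem : Nat)
    (p : List Int) (d : PySem.Dict (Nat × Nat) (List Int)) (i : Nat) :
    PySem.Dict (Nat × Nat) (List Int) :=
  if mask.testBit i then d
  else
    let nm := mask ||| (1 <<< i)
    let nr := pvNextRem nums k nd p10 rem i
    match d.get? (nm, nr) with
    | some _ => d
    | none => d.insert (nm, nr) (p ++ [nums.getD i 0])

-- B's triple loop over the dict of stored paths; dp = {(0, 0): []}
def pvPathsB (nums : List Int) (k : Int) : PySem.Dict (Nat × Nat) (List Int) :=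
  (List.range (2 ^ nums.length)).foldl
    (fun d mask =>
      (List.range k.toNat).foldl
        (fun d rem =>
          match d.get? (mask, rem) with
          | none => d
          | some p =>
            (List.range nums.length).foldl
              (pvStepB nums k (nums.map pvDigits) (pvPow10 k) mask rem p) d) d)
    (PySem.Dict.empty.insert (0, 0) [])

def concatenatedDivisibility_alt (nums : List Int) (k : Int) : List Int :=
  ((pvPathsB nums k).get? (2 ^ nums.length - 1, 0)).getD []

-- ===== PRECONDITION & SPEC =====
-- Pre_ excludes exactly the inputs where A raises: k = 0 (ZeroDivisionError in the pow10 loop),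
-- k < 0 (IndexError on dp[0][0], the inner lists are empty), and elements ≤ -10^9, whose str()
-- has 11 characters so pow10[11] raises IndexError (within Dom positive elements have ≤ 10 digits).
def Pre_concatenatedDivisibility (nums : List Int) (k : Int) : Prop :=
  0 < k ∧ ∀ x ∈ nums, -1000000000 < x
instance (nums : List Int) (k : Int) : Decidable (Pre_concatenatedDivisibility nums k) := by
  unfold Pre_concatenatedDivisibility; infer_instance

def pvWitness_concatenatedDivisibility : List Int × Int := ([3, 12, 45], 5)

def Spec_concatenatedDivisibility (nums : List Int) (k : Int) (out : List Int) : Prop :=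
  out = concatenatedDivisibility_alt nums k
instance (nums : List Int) (k : Int) (out : List Int) : Decidable (Spec_concatenatedDivisibility nums k out) := by
  unfold Spec_concatenatedDivisibility; infer_instance

-- ===== CLAIM (what is proved, stated in full; the proofs are below) =====
def Claim_equal_concatenatedDivisibility : Prop :=
  ∀ (nums : List Int) (k : Int), Dom_concatenatedDivisibility nums k →
    Pre_concatenatedDivisibility nums k →
    Spec_concatenatedDivisibility nums k (concatenatedDivisibility nums k)

-- ===== LEMMAS AND PROOFS =====

-- table shape: 2^n rows of k columns
def pvShape {α : Type} (N kn : Nat) (t : List (List α)) : Prop :=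
  t.length = N ∧ ∀ j, j < N → (t.getD j []).length = kn

lemma pvShape_set2 {α : Type} {N kn : Nat} {t : List (List α)} (h : pvShape N kn t)
    (m r : Nat) (v : α) : pvShape N kn (pvSet2 t m r v) := by
  obtain ⟨hlen, hrow⟩ := h
  refine ⟨by simp [pvSet2, hlen], ?_⟩
  intro j hj
  by_cases hjm : j = m
  · subst hjm
    by_cases hlt : j < t.length
    · have hro := hrow j hj
      simp only [List.getD] at hro
      simp [pvSet2, List.getD, List.getElem?_set_self hlt, hro]
    · simp [pvSet2, List.set_eq_of_length_le (by omega)]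
      exact hrow j hj
  · simp [pvSet2, List.getD, List.getElem?_set_ne (by omega : m ≠ j)]
    exact hrow j hj

lemma pvShape_replicate {α : Type} (N kn : Nat) (v : α) :
    pvShape N kn (List.replicate N (List.replicate kn v)) := by
  refine ⟨by simp, ?_⟩
  intro j hj
  simp [List.getD, hj]

lemma pvGet2_replicate {α : Type} (N kn : Nat) (v : α) (m r : Nat) (d : α) :
    pvGet2 (List.replicate N (List.replicate kn v)) m r d = if m < N ∧ r < kn then v else d := by
  unfold pvGet2
  by_cases hm : m < N
  · simp only [List.getD, List.getElem?_replicate, hm, if_true]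
    by_cases hr : r < kn <;> simp [hr]
  · simp [List.getD, hm]

lemma pvGet2_set2_self {α : Type} {N kn : Nat} {t : List (List α)} (h : pvShape N kn t)
    {m r : Nat} (hm : m < N) (hr : r < kn) (v d : α) :
    pvGet2 (pvSet2 t m r v) m r d = v := by
  obtain ⟨hlen, hrow⟩ := h
  have hmt : m < t.length := by omega
  have hrt : r < (t[m]?.getD ([] : List α)).length := by
    have := hrow m hm; simp only [List.getD] at this; omega
  simp only [pvGet2, pvSet2, List.getD]
  rw [List.getElem?_set_self hmt, Option.getD_some, List.getElem?_set_self hrt, Option.getD_some]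

lemma pvGet2_set2_ne {α : Type} (t : List (List α)) {m r x y : Nat}
    (hne : ¬(x = m ∧ y = r)) (v d : α) :
    pvGet2 (pvSet2 t m r v) x y d = pvGet2 t x y d := by
  by_cases hxm : x = m
  · subst hxm
    have hyr : y ≠ r := fun h => hne ⟨rfl, h⟩
    by_cases hlt : x < t.length
    · simp only [pvGet2, pvSet2, List.getD]
      rw [List.getElem?_set_self hlt, Option.getD_some,
          List.getElem?_set_ne (show r ≠ y from fun h => hyr h.symm)]
    · have hge : t.length ≤ x := Nat.le_of_not_lt hlt
      simp only [pvGet2, pvSet2]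
      rw [List.set_eq_of_length_le hge]
  · simp only [pvGet2, pvSet2, List.getD]
    rw [List.getElem?_set_ne (show m ≠ x from fun h => hxm h.symm)]

-- coupling invariant between A's (dp, parent, last_elem) tables and B's dict of stored paths
def pvInv (nums : List Int) (N kn : Nat)
    (st : List (List Bool) × List (List (Int × Int)) × List (List Int))
    (d : PySem.Dict (Nat × Nat) (List Int)) : Prop :=
  pvShape N kn st.1 ∧ pvShape N kn st.2.1 ∧ pvShape N kn st.2.2
  ∧ (∀ m r, (d.get? (m, r)).isSome = pvGet2 st.1 m r false)
  ∧ (∀ r, d.get? (0, r) = if r = 0 then some [] else none)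
  ∧ (∀ m r, pvGet2 st.1 m r false = true → m ≠ 0 →
      (pvGet2 st.2.1 m r (-1, -1)).1.toNat < m ∧
      ∃ p, d.get? ((pvGet2 st.2.1 m r (-1, -1)).1.toNat,
                   (pvGet2 st.2.1 m r (-1, -1)).2.toNat) = some p ∧
           d.get? (m, r) = some (p ++ [nums.getD (pvGet2 st.2.2 m r (-1 : Int)).toNat 0]))

lemma pvFoldRel {α β γ : Type} (R : α → β → Prop) (f : α → γ → α) (g : β → γ → β) :
    ∀ (l : List γ), (∀ a b x, x ∈ l → R a b → R (f a x) (g b x)) →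
      ∀ (a : α) (b : β), R a b → R (l.foldl f a) (l.foldl g b) := by
  intro l
  induction l with
  | nil => intro _ a b h; exact h
  | cons x l ih =>
    intro hstep a b h
    exact ih (fun a b y hy => hstep a b y (List.mem_cons_of_mem x hy)) _ _
      (hstep a b x (List.mem_cons_self) h)

lemma pvMask_lt_or (mask i : Nat) (h : mask.testBit i = false) :
    mask < mask ||| (1 <<< i) := by
  have h1 : (1 : Nat) <<< i = 2 ^ i := by simp [Nat.shiftLeft_eq]
  have hle : mask ≤ mask ||| (1 <<< i) := Nat.left_le_or
  rcases Nat.lt_or_ge mask (mask ||| (1 <<< i)) with hlt | hge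
  · exact hlt
  · exfalso
    have heq : mask = mask ||| (1 <<< i) := Nat.le_antisymm hle hge
    have : (mask ||| (1 <<< i)).testBit i = true := by
      simp [Nat.testBit_or, h1, Nat.testBit_two_pow_self]
    rw [← heq] at this
    simp [h] at this

lemma pvOr_ne_zero (mask i : Nat) : mask ||| (1 <<< i) ≠ 0 := by
  intro h
  have h1 : (1 : Nat) <<< i = 2 ^ i := by simp [Nat.shiftLeft_eq]
  have : (mask ||| (1 <<< i)).testBit i = true := by
    simp [Nat.testBit_or, h1, Nat.testBit_two_pow_self]
  rw [h] at this
  simp [Nat.zero_testBit] at this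

lemma pvOr_lt_two_pow {mask i n : Nat} (hm : mask < 2 ^ n) (hi : i < n) :
    mask ||| (1 <<< i) < 2 ^ n := by
  have h1 : (1 : Nat) <<< i = 2 ^ i := by simp [Nat.shiftLeft_eq]
  rw [h1]
  exact Nat.or_lt_two_pow hm (Nat.pow_lt_pow_right (by omega) hi)

lemma pvNextRem_lt (nums : List Int) (k : Int) (nd : List Nat) (p10 : List Int)
    (rem i : Nat) (hk : 0 < k) : pvNextRem nums k nd p10 rem i < k.toNat := by
  unfold pvNextRem
  have h1 := PySem.Int.mod_nonneg ((rem : Int) * p10.getD (nd.getD i 0) 0 + nums.getD i 0) hk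
  have h2 := PySem.Int.mod_lt ((rem : Int) * p10.getD (nd.getD i 0) 0 + nums.getD i 0) hk
  omega

lemma pvStep_pres (nums : List Int) (k : Int) (nd : List Nat) (p10 : List Int)
    (N kn : Nat) (hN : N = 2 ^ nums.length) (hkn : kn = k.toNat) (hk : 0 < k)
    (mask rem : Nat) (hmask : mask < N) (p : List Int)
    (st : List (List Bool) × List (List (Int × Int)) × List (List Int))
    (d : PySem.Dict (Nat × Nat) (List Int)) (i : Nat) (hi : i < nums.length)
    (h : pvInv nums N kn st d ∧ d.get? (mask, rem) = some p) :
    pvInv nums N kn (pvStepA nums k nd p10 mask rem st i) (pvStepB nums k nd p10 mask rem p d i)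
    ∧ (pvStepB nums k nd p10 mask rem p d i).get? (mask, rem) = some p := by
  obtain ⟨⟨hs1, hs2, hs3, h1, h2, h3⟩, hmr⟩ := h
  by_cases htb : mask.testBit i
  · simp only [pvStepA, pvStepB, htb, if_true]
    exact ⟨⟨hs1, hs2, hs3, h1, h2, h3⟩, hmr⟩
  · have htb' : mask.testBit i = false := by simpa using htb
    simp only [pvStepA, pvStepB, htb', Bool.false_eq_true, if_false]
    set nm := mask ||| (1 <<< i) with hnm
    set nr := pvNextRem nums k nd p10 rem i with hnr
    have hlt : mask < nm := pvMask_lt_or mask i htb'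
    have hnm0 : nm ≠ 0 := pvOr_ne_zero mask i
    have hnmN : nm < N := by rw [hN]; exact pvOr_lt_two_pow (hN ▸ hmask) hi
    have hnrk : nr < kn := by rw [hkn]; exact pvNextRem_lt nums k nd p10 rem i hk
    cases hcase : d.get? (nm, nr) with
    | some q =>
      have : pvGet2 st.1 nm nr false = true := by rw [← h1]; simp [hcase]
      simp only [this, if_true]
      exact ⟨⟨hs1, hs2, hs3, h1, h2, h3⟩, hmr⟩
    | none =>
      have hdp : pvGet2 st.1 nm nr false = false := by rw [← h1]; simp [hcase]
      simp only [hdp, Bool.false_eq_true, if_false]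
      have hmne : (mask, rem) ≠ (nm, nr) := by
        intro he
        exact absurd (congrArg Prod.fst he) (Nat.ne_of_lt hlt)
      refine ⟨⟨pvShape_set2 hs1 _ _ _, pvShape_set2 hs2 _ _ _, pvShape_set2 hs3 _ _ _,
              ?_, ?_, ?_⟩, ?_⟩
      · intro m r
        by_cases hky : (m, r) = (nm, nr)
        · have hm : m = nm := congrArg Prod.fst hky
          have hr : r = nr := congrArg Prod.snd hky
          subst hm; subst hr
          rw [PySem.Dict.get?_insert_self d _ _, pvGet2_set2_self hs1 hnmN hnrk]
          rfl
        · have hky' : ¬(m = nm ∧ r = nr) := fun ⟨a, b⟩ => hky (by rw [a, b])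
          rw [PySem.Dict.get?_insert_of_ne d _ hky, pvGet2_set2_ne _ hky']
          exact h1 m r
      · intro r
        have : ((0 : Nat), r) ≠ (nm, nr) := by
          intro he
          exact hnm0 (congrArg Prod.fst he).symm
        rw [PySem.Dict.get?_insert_of_ne d _ this]
        exact h2 r
      · intro m r hdpmr hm0
        by_cases hky : (m, r) = (nm, nr)
        · have hm : m = nm := congrArg Prod.fst hky
          have hr : r = nr := congrArg Prod.snd hky
          subst hm; subst hr
          rw [pvGet2_set2_self hs2 hnmN hnrk, pvGet2_set2_self hs3 hnmN hnrk]
          simp only [Int.toNat_natCast]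
          refine ⟨hlt, p, ?_, ?_⟩
          · rw [PySem.Dict.get?_insert_of_ne d _ hmne]
            exact hmr
          · rw [PySem.Dict.get?_insert_self d _ _]
        · have hky' : ¬(m = nm ∧ r = nr) := fun ⟨a, b⟩ => hky (by rw [a, b])
          rw [pvGet2_set2_ne _ hky'] at hdpmr
          rw [pvGet2_set2_ne _ hky', pvGet2_set2_ne _ hky']
          obtain ⟨hplt, q, hq1, hq2⟩ := h3 m r hdpmr hm0
          have hpne : ((pvGet2 st.2.1 m r (-1, -1)).1.toNat,
                       (pvGet2 st.2.1 m r (-1, -1)).2.toNat) ≠ (nm, nr) := by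
            intro he
            rw [he, hcase] at hq1
            simp at hq1
          refine ⟨hplt, q, ?_, ?_⟩
          · rw [PySem.Dict.get?_insert_of_ne d _ hpne]; exact hq1
          · rw [PySem.Dict.get?_insert_of_ne d _ hky]; exact hq2
      · rw [PySem.Dict.get?_insert_of_ne d _ hmne]; exact hmr

lemma pvInv_tables (nums : List Int) (k : Int) (hk : 0 < k) :
    pvInv nums (2 ^ nums.length) k.toNat (pvTablesA nums k) (pvPathsB nums k) := by
  unfold pvTablesA pvPathsB
  apply pvFoldRel (pvInv nums (2 ^ nums.length) k.toNat)
  · intro st d mask hmem hinv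
    have hmask : mask < 2 ^ nums.length := List.mem_range.mp hmem
    apply pvFoldRel (pvInv nums (2 ^ nums.length) k.toNat)
    · intro st d rem _ hinv
      cases hcase : d.get? (mask, rem) with
      | none =>
        have : pvGet2 st.1 mask rem false = false := by
          rw [← hinv.2.2.2.1]; simp [hcase]
        simp only [this, Bool.false_eq_true, if_false]
        exact hinv
      | some p =>
        have : pvGet2 st.1 mask rem false = true := by
          rw [← hinv.2.2.2.1]; simp [hcase]
        simp only [this, if_true]
        have := pvFoldRel
          (fun st d => pvInv nums (2 ^ nums.length) k.toNat st d ∧ d.get? (mask, rem) = some p)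
          (pvStepA nums k (nums.map pvDigits) (pvPow10 k) mask rem)
          (pvStepB nums k (nums.map pvDigits) (pvPow10 k) mask rem p)
          (List.range nums.length)
          (fun a b x hx h => pvStep_pres nums k _ _ _ _ rfl rfl hk mask rem hmask p a b x
            (List.mem_range.mp hx) h)
          st d ⟨hinv, hcase⟩
        exact this.1
    · exact hinv
  · have hN : 0 < 2 ^ nums.length := Nat.two_pow_pos nums.length
    have hkn : 0 < k.toNat := by omega
    have hsh := pvShape_replicate (2 ^ nums.length) k.toNat false
    refine ⟨pvShape_set2 hsh 0 0 true,
            pvShape_replicate _ _ _, pvShape_replicate _ _ _, ?_, ?_, ?_⟩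
    · intro m r
      by_cases hky : (m, r) = ((0 : Nat), (0 : Nat))
      · have hm : m = 0 := congrArg Prod.fst hky
        have hr : r = 0 := congrArg Prod.snd hky
        subst hm; subst hr
        rw [pvGet2_set2_self hsh hN hkn, PySem.Dict.get?_insert_self PySem.Dict.empty _ _]
        rfl
      · have hky' : ¬(m = 0 ∧ r = 0) := fun ⟨a, b⟩ => hky (by rw [a, b])
        rw [pvGet2_set2_ne _ hky', pvGet2_replicate,
            PySem.Dict.get?_insert_of_ne PySem.Dict.empty _ hky, PySem.Dict.get?_empty]
        simp
    · intro r
      by_cases hr : r = 0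
      · subst hr
        rw [PySem.Dict.get?_insert_self PySem.Dict.empty _ _]
        rfl
      · have : ((0 : Nat), r) ≠ ((0 : Nat), (0 : Nat)) := fun he => hr (congrArg Prod.snd he)
        rw [PySem.Dict.get?_insert_of_ne PySem.Dict.empty _ this, PySem.Dict.get?_empty]
        simp [hr]
    · intro m r hmr hm0
      by_cases hky' : m = 0 ∧ r = 0
      · exact absurd hky'.1 hm0
      · rw [pvGet2_set2_ne _ hky', pvGet2_replicate] at hmr
        simp at hmr

lemma pvBacktrack_eq (nums : List Int) (N kn : Nat)
    (st : List (List Bool) × List (List (Int × Int)) × List (List Int))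
    (d : PySem.Dict (Nat × Nat) (List Int)) (h : pvInv nums N kn st d) :
    ∀ m fuel, m < fuel → ∀ r acc p, d.get? (m, r) = some p →
      pvBacktrack nums st.2.1 st.2.2 fuel m r acc = acc ++ p.reverse := by
  intro m
  induction m using Nat.strong_induction_on with
  | _ m ih =>
    intro fuel hf r acc p hp
    obtain ⟨f, rfl⟩ : ∃ f, fuel = f + 1 := ⟨fuel - 1, by omega⟩
    by_cases hm0 : m = 0
    · subst hm0
      have := h.2.2.2.2.1 r
      rw [hp] at this
      by_cases hr : r = 0
      · subst hr
        simp at this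
        subst this
        simp [pvBacktrack]
      · simp [hr] at this
    · have hdp : pvGet2 st.1 m r false = true := by
        rw [← h.2.2.2.1]; simp [hp]
      obtain ⟨hplt, q, hq1, hq2⟩ := h.2.2.2.2.2 m r hdp hm0
      rw [hp] at hq2
      have hpq : p = q ++ [nums.getD (pvGet2 st.2.2 m r (-1 : Int)).toNat 0] :=
        Option.some.inj hq2
      simp only [pvBacktrack, hm0, if_false]
      rw [ih (pvGet2 st.2.1 m r (-1, -1)).1.toNat hplt f (by omega) _ _ q hq1]
      rw [hpq]
      simp

-- ===== VERDICT (by name: the statement is the Claim_ definition above) =====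
theorem concatenatedDivisibility_spec : Claim_equal_concatenatedDivisibility := by
  intro nums k _ hpre
  unfold Spec_concatenatedDivisibility concatenatedDivisibility concatenatedDivisibility_alt
  dsimp only
  have hinv := pvInv_tables nums k hpre.1
  cases hcase : (pvPathsB nums k).get? (2 ^ nums.length - 1, 0) with
  | none =>
    have h0 : pvGet2 (pvTablesA nums k).1 (2 ^ nums.length - 1) 0 false = false := by
      rw [← hinv.2.2.2.1]; simp [hcase]
    simp [h0]
  | some p =>
    have h1 : pvGet2 (pvTablesA nums k).1 (2 ^ nums.length - 1) 0 false = true := by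
      rw [← hinv.2.2.2.1]; simp [hcase]
    have hlt : 2 ^ nums.length - 1 < 2 ^ nums.length := by
      have := Nat.two_pow_pos nums.length; omega
    simp only [h1, if_true]
    rw [pvBacktrack_eq nums _ _ _ _ hinv _ _ hlt 0 [] p hcase]
    simp
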